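-- pv_equiv track=rewrite | github.com/g873249824/codeaster | bibpyt/Noyau/N_CR.py | encadre_message
-- ===== SOURCE A (Python) =====
-- separateurs = (' ', ',', '/')
--
-- def split(ligne, cesure):
--     ligne = ligne.rstrip()
--     if len(ligne) <= cesure:
--         return ligne
--     else:
--         coupure = cesure
--         while ligne[coupure] not in separateurs and coupure > 0:
--             coupure = coupure - 1
--         if coupure == 0:
--             # Il faut augmenter la cesure
--             coupure = cesure
--             while ligne[coupure] not in separateurs and coupure < len(ligne) - 1:
--                 coupure = coupure + 1
--         if coupure == len(ligne) - 1:
--             return ligne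
--         else:
--             return ligne[:coupure + 1] + '\n' + split(ligne[coupure + 1:], cesure)
--
-- def justify_text(texte='', cesure=50):
--     texte = texte.strip()
--     liste_lignes = texte.split('\n')
--     l = [split(l, cesure) for l in liste_lignes]
--     texte_justifie = '\n'.join(l)
--     return texte_justifie
--
-- def encadre_message(texte, motif):
--     """
--        Retourne la chaine de caractères texte entourée d'un cadre formés
--        d'éléments 'motif'
--     """
--     texte = justify_text(texte, cesure=80)
--     lignes = texte.split('\n')
--     longueur = 0
--     for ligne in lignes:
--         ligne = ligne.rstrip()
--         if len(ligne) > longueur: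
--             longueur = len(ligne)
--     longueur = longueur + 4
--     txt = motif * longueur + '\n'
--     for ligne in lignes:
--         txt = txt + motif + ' ' + ligne + ' ' * \
--             (longueur - len(motif + ligne) - 2) + motif + '\n'
--     txt = txt + motif * longueur + '\n'
--     return txt
-- ===== SOURCE B (Python) =====
-- # B: iterative wrapper (loop + list of pieces) instead of A's string-recursive split;
-- # box assembled with a list + join instead of repeated concatenation.
-- separateurs = (' ', ',', '/')
--
-- def _wrap(ligne, cesure):
--     out = []
--     remaining = ligne
--     while True:
--         remaining = remaining.rstrip()
--         if len(remaining) <= cesure: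
--             out.append(remaining)
--             return out
--         coupure = 0
--         for i in range(cesure + 1):
--             if remaining[i] in separateurs:
--                 coupure = i
--         if coupure == 0:
--             coupure = next((i for i in range(cesure, len(remaining) - 1)
--                             if remaining[i] in separateurs), len(remaining) - 1)
--         if coupure == len(remaining) - 1:
--             out.append(remaining)
--             return out
--         out.append(remaining[:coupure + 1])
--         remaining = remaining[coupure + 1:]
--
-- def encadre_message(texte, motif):
--     lignes = [piece for ligne in texte.strip().split('\n') for piece in _wrap(ligne, 80)]
--     longueur = max(len(l.rstrip()) for l in lignes) + 4
--     rows = [motif + ' ' + l + ' ' * (longueur - len(motif + l) - 2) + motif for l in lignes]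
--     bar = motif * longueur
--     return '\n'.join([bar] + rows + [bar]) + '\n'
-- ===== Notes on version B (the rewrite author's own statement) =====
-- stated objective: alternative
-- what changed: The recursive split is replaced by an explicit loop collecting wrapped pieces (with a forward last-separator scan and a first-separator search instead of the two backward/forward while loops), and the frame is assembled from a list of rows with a single join instead of repeated string concatenation.
import Mathlib
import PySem

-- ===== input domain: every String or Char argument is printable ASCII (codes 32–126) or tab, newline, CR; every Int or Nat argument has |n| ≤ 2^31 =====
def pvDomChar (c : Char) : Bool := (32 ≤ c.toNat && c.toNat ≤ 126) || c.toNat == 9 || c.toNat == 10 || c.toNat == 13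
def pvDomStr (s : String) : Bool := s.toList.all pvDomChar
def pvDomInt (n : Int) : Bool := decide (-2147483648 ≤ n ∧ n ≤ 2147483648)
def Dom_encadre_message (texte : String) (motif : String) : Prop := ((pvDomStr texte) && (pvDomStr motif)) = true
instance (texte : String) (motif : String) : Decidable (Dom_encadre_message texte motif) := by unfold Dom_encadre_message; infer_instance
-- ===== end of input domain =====

-- B wraps lines with an explicit loop collecting pieces (forward last-separator scan /
-- first-separator search) and builds the frame with a list + join, instead of A's
-- string-recursive split and repeated concatenation; same return value (objective: alternative).


-- module constant `separateurs`: membership test `c in (' ', ',', '/')` (shared by both Pythons)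
def isSep (c : Char) : Bool := c == ' ' || c == ',' || c == '/'

-- used by the termination proofs of splitA / wrapB
theorem rstrip_length_le (l : List Char) : (PySem.Chars.rstrip l).length ≤ l.length := by
  simp [PySem.Chars.rstrip]
  calc (List.dropWhile PySem.Chars.isspace l.reverse).length
      ≤ l.reverse.length := List.length_dropWhile_le _ _
    _ = l.length := List.length_reverse

-- ===== PORT A =====
-- A's backward while loop: `while ligne[coupure] not in separateurs and coupure > 0: coupure -= 1`
-- (index always in range at the call sites: coupure ≤ cesure < len ligne; getD default never read)
def backA (r : List Char) : Nat → Nat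
  | 0 => 0
  | c + 1 => if isSep (r.getD (c + 1) ' ') then c + 1 else backA r c

-- A's forward while loop: `while ligne[coupure] not in separateurs and coupure < len(ligne)-1: coupure += 1`
def fwdA (r : List Char) (c : Nat) : Nat :=
  if isSep (r.getD c ' ') = true ∨ r.length - 1 ≤ c then c else fwdA r (c + 1)
termination_by r.length - c
decreasing_by rename_i h; rw [not_or] at h; omega

-- the `coupure` A's split ends up with (backward search, then the grow-cesure fallback)
def coupureA (l : List Char) (cesure : Nat) : Nat :=
  if backA l cesure = 0 then fwdA l cesure else backA l cesure

-- A's recursive `split(ligne, cesure)`; slices ligne[:coupure+1] / ligne[coupure+1:] are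
-- exact take/drop (nonnegative in-range bounds)
def splitA (ligne : List Char) (cesure : Nat) : List Char :=
  if (PySem.Chars.rstrip ligne).length ≤ cesure then PySem.Chars.rstrip ligne
  else if coupureA (PySem.Chars.rstrip ligne) cesure = (PySem.Chars.rstrip ligne).length - 1 then
    PySem.Chars.rstrip ligne
  else
    (PySem.Chars.rstrip ligne).take (coupureA (PySem.Chars.rstrip ligne) cesure + 1) ++
      '\n' :: splitA ((PySem.Chars.rstrip ligne).drop (coupureA (PySem.Chars.rstrip ligne) cesure + 1)) cesure
termination_by ligne.length
decreasing_by
  have h1 := rstrip_length_le ligne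
  rename_i h2 _
  simp only [List.length_drop]
  omega

def justifyA (texte : List Char) (cesure : Nat) : List Char :=
  PySem.Chars.join ['\n']
    ((PySem.Chars.splitOn (PySem.Chars.strip texte) ['\n']).map (fun l => splitA l cesure))

def encadreCoreA (texte motif : List Char) : List Char :=
  let t := justifyA texte 80
  let lignes := PySem.Chars.splitOn t ['\n']
  let longueur := lignes.foldl (fun acc l =>
      if (PySem.Chars.rstrip l).length > acc then (PySem.Chars.rstrip l).length else acc) 0 + 4
  let txt := (List.replicate longueur motif).flatten ++ ['\n']
  let txt := lignes.foldl (fun t l =>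
      t ++ motif ++ [' '] ++ l ++
        List.replicate (longueur - (motif.length + l.length) - 2) ' ' ++ motif ++ ['\n']) txt
  txt ++ (List.replicate longueur motif).flatten ++ ['\n']

def encadre_message (texte : String) (motif : String) : String :=
  String.ofList (encadreCoreA texte.toList motif.toList)

-- ===== PORT B =====
-- B's forward scan for the LAST separator index in remaining[0..cesure]
def backB (r : List Char) (cesure : Nat) : Nat :=
  (List.range (cesure + 1)).foldl (fun acc i => if isSep (r.getD i ' ') then i else acc) 0

-- B's `next((i for i in range(cesure, len(remaining)-1) if …), len(remaining)-1)`
def fwdB (r : List Char) (cesure : Nat) : Nat :=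
  ((List.range' cesure (r.length - 1 - cesure)).find? (fun i => isSep (r.getD i ' '))).getD
    (r.length - 1)

-- B's `coupure` (last-separator scan, then the first-separator fallback)
def coupureB (r : List Char) (cesure : Nat) : Nat :=
  if backB r cesure = 0 then fwdB r cesure else backB r cesure

-- B's `_wrap`: the while-True loop collecting wrapped pieces
def wrapB (ligne : List Char) (cesure : Nat) : List (List Char) :=
  if (PySem.Chars.rstrip ligne).length ≤ cesure then [PySem.Chars.rstrip ligne]
  else if coupureB (PySem.Chars.rstrip ligne) cesure = (PySem.Chars.rstrip ligne).length - 1 then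
    [PySem.Chars.rstrip ligne]
  else
    (PySem.Chars.rstrip ligne).take (coupureB (PySem.Chars.rstrip ligne) cesure + 1) ::
      wrapB ((PySem.Chars.rstrip ligne).drop (coupureB (PySem.Chars.rstrip ligne) cesure + 1)) cesure
termination_by ligne.length
decreasing_by
  have h1 := rstrip_length_le ligne
  rename_i h2 _
  simp only [List.length_drop]
  omega

-- B's encadre_message; Python's max over the (always nonempty) list is the folded max
def encadreCoreB (texte motif : List Char) : List Char :=
  let lignes := (PySem.Chars.splitOn (PySem.Chars.strip texte) ['\n']).flatMap
      (fun l => wrapB l 80)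
  let longueur := (lignes.map (fun l => (PySem.Chars.rstrip l).length)).foldl max 0 + 4
  let bar := (List.replicate longueur motif).flatten
  let rows := lignes.map (fun l =>
      motif ++ [' '] ++ l ++
        List.replicate (longueur - (motif.length + l.length) - 2) ' ' ++ motif)
  PySem.Chars.join ['\n'] ([bar] ++ rows ++ [bar]) ++ ['\n']

def encadre_message_alt (texte : String) (motif : String) : String :=
  String.ofList (encadreCoreB texte.toList motif.toList)

-- ===== PRECONDITION & SPEC =====
def Spec_encadre_message (texte : String) (motif : String) (out : String) : Prop := out = encadre_message_alt texte motif
instance (texte : String) (motif : String) (out : String) : Decidable (Spec_encadre_message texte motif out) := by unfold Spec_encadre_message; infer_instance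

-- ===== CLAIM (what is proved, stated in full; the proofs are below) =====
def Claim_equal_encadre_message : Prop := ∀ (texte : String) (motif : String), Dom_encadre_message texte motif → Spec_encadre_message texte motif (encadre_message texte motif)

-- ===== LEMMAS AND PROOFS =====

-- ---- the two separator searches agree ----

theorem back_eq (r : List Char) (c : Nat) : backA r c = backB r c := by
  induction c with
  | zero => simp [backA, backB]
  | succ c ih =>
    have hb : backB r (c + 1) = if isSep (r.getD (c + 1) ' ') then c + 1 else backB r c := by
      simp [backB, List.range_succ]
    rw [backA, hb, ih]

theorem fwd_eq (r : List Char) (c : Nat) (h : c ≤ r.length - 1) : fwdA r c = fwdB r c := by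
  generalize hn : r.length - 1 - c = n
  induction n generalizing c with
  | zero =>
    have hc : c = r.length - 1 := by omega
    rw [fwdA, fwdB, show r.length - 1 - c = 0 from by omega, if_pos (Or.inr (by omega))]
    simp [hc]
  | succ n ih =>
    have hlt : c < r.length - 1 := by omega
    rw [fwdA, fwdB, show r.length - 1 - c = n + 1 from hn, List.range'_succ]
    by_cases hs : isSep (r.getD c ' ') = true
    · rw [if_pos (Or.inl hs), List.find?_cons_of_pos (p := fun i => isSep (r.getD i ' ')) hs]
      simp
    · rw [if_neg (by rw [not_or]; exact ⟨hs, by omega⟩),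
          List.find?_cons_of_neg (p := fun i => isSep (r.getD i ' ')) (by simpa using hs),
          ih (c + 1) (by omega) (by omega), fwdB,
          show r.length - 1 - (c + 1) = n from by omega]

theorem coupure_eq (l : List Char) (c : Nat) (h : c ≤ l.length - 1) :
    coupureA l c = coupureB l c := by
  rw [coupureA, coupureB, back_eq, fwd_eq l c h]

-- ---- split = join of wrap ----

theorem wrapB_ne_nil (ligne : List Char) (cesure : Nat) : wrapB ligne cesure ≠ [] := by
  rw [wrapB]
  split_ifs <;> simp

theorem split_wrap_aux (n : Nat) : ∀ (ligne : List Char), ligne.length ≤ n → ∀ (cesure : Nat),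
    splitA ligne cesure = PySem.Chars.join ['\n'] (wrapB ligne cesure) := by
  induction n with
  | zero =>
    intro ligne hl cesure
    have : ligne = [] := by cases ligne <;> simp_all
    subst this
    rw [splitA, wrapB]
    have h0 : (PySem.Chars.rstrip ([] : List Char)).length ≤ cesure := by
      rw [show PySem.Chars.rstrip ([] : List Char) = [] from rfl]
      simp
    rw [if_pos h0, if_pos h0, PySem.Chars.join_singleton]
  | succ n ih =>
    intro ligne hl cesure
    rw [splitA, wrapB]
    by_cases h1 : (PySem.Chars.rstrip ligne).length ≤ cesure
    · rw [if_pos h1, if_pos h1, PySem.Chars.join_singleton]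
    · rw [if_neg h1, if_neg h1]
      have hcc : coupureA (PySem.Chars.rstrip ligne) cesure = coupureB (PySem.Chars.rstrip ligne) cesure :=
        coupure_eq _ _ (by omega)
      rw [hcc]
      by_cases h2 : coupureB (PySem.Chars.rstrip ligne) cesure = (PySem.Chars.rstrip ligne).length - 1
      · rw [if_pos h2, if_pos h2, PySem.Chars.join_singleton]
      · rw [if_neg h2, if_neg h2]
        have hrec : splitA ((PySem.Chars.rstrip ligne).drop (coupureB (PySem.Chars.rstrip ligne) cesure + 1)) cesure
            = PySem.Chars.join ['\n'] (wrapB ((PySem.Chars.rstrip ligne).drop (coupureB (PySem.Chars.rstrip ligne) cesure + 1)) cesure) := by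
          apply ih
          have := rstrip_length_le ligne
          simp only [List.length_drop]
          omega
        rw [hrec]
        rcases hw : wrapB ((PySem.Chars.rstrip ligne).drop (coupureB (PySem.Chars.rstrip ligne) cesure + 1)) cesure with _ | ⟨w, ws⟩
        · exact absurd hw (wrapB_ne_nil _ _)
        · rw [PySem.Chars.join_cons_cons]
          simp

theorem split_wrap (ligne : List Char) (cesure : Nat) :
    splitA ligne cesure = PySem.Chars.join ['\n'] (wrapB ligne cesure) :=
  split_wrap_aux ligne.length ligne le_rfl cesure

-- ---- characterisation of splitOn at sep = "\n" ----

def splitPieces (pre : List Char) : List Char → List (List Char)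
  | [] => [pre]
  | c :: rest => if c = '\n' then pre :: splitPieces [] rest else splitPieces (pre ++ [c]) rest

theorem go_eq (fuel : Nat) : ∀ (l cur : List Char) (acc : List (List Char)), l.length ≤ fuel →
    PySem.Chars.splitOn.go ['\n'] fuel l cur acc = acc.reverse ++ splitPieces cur.reverse l := by
  induction fuel with
  | zero =>
    intro l cur acc h
    have : l = [] := by cases l <;> simp_all
    subst this
    rw [PySem.Chars.splitOn.go.eq_def]
    simp [splitPieces]
  | succ fuel ih =>
    intro l cur acc h
    cases l with
    | nil => rw [PySem.Chars.splitOn.go.eq_def]; simp [splitPieces]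
    | cons c rest =>
      rw [PySem.Chars.splitOn.go.eq_def]
      have hlen : rest.length ≤ fuel := by simp at h; omega
      by_cases hc : c = '\n'
      · subst hc
        have hpre : List.isPrefixOf ['\n'] ('\n' :: rest) = true := by
          simp
        simp only [hpre, if_true, List.length_singleton, List.drop_succ_cons, List.drop_zero]
        rw [ih rest [] (cur.reverse :: acc) hlen]
        simp [splitPieces]
      · have hpre : List.isPrefixOf ['\n'] (c :: rest) = false := by
          simp only [List.isPrefixOf_cons₂, List.isPrefixOf_nil_left, Bool.and_true,
            beq_eq_false_iff_ne, ne_eq]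
          exact fun hh => hc hh.symm
        simp only [hpre, Bool.false_eq_true, if_false]
        rw [ih rest (c :: cur) acc hlen]
        simp [splitPieces, hc]

theorem splitOn_pieces (s : List Char) :
    PySem.Chars.splitOn s ['\n'] = splitPieces [] s := by
  rw [PySem.Chars.splitOn.eq_1, go_eq (s.length + 1) s [] [] (by omega)]
  simp

theorem splitPieces_ne_nil (l pre : List Char) : splitPieces pre l ≠ [] := by
  induction l generalizing pre with
  | nil => simp [splitPieces]
  | cons c rest ih =>
    rw [splitPieces]
    split_ifs
    · simp
    · exact ih _

theorem splitPieces_free (l : List Char) : ∀ (pre : List Char), '\n' ∉ pre →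
    ∀ p ∈ splitPieces pre l, '\n' ∉ p := by
  induction l with
  | nil => intro pre hpre p hp; rw [splitPieces] at hp; simp at hp; subst hp; exact hpre
  | cons c rest ih =>
    intro pre hpre p hp
    rw [splitPieces] at hp
    split_ifs at hp with hc
    · rcases List.mem_cons.mp hp with hp1 | hp1
      · subst hp1; exact hpre
      · exact ih [] (by simp) p hp1
    · exact ih (pre ++ [c]) (by simp [hpre, Ne.symm hc]) p hp

theorem splitPieces_append (p : List Char) : ∀ (pre t : List Char), '\n' ∉ p →
    splitPieces pre (p ++ t) = splitPieces (pre ++ p) t := by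
  induction p with
  | nil => intro pre t _; simp
  | cons c cs ih =>
    intro pre t hp
    have hc : c ≠ '\n' := by simp at hp; exact fun h => hp.1 h.symm
    rw [List.cons_append, splitPieces, if_neg hc, ih (pre ++ [c]) t (by simp at hp; exact hp.2)]
    simp

theorem pieces_join (parts : List (List Char)) (hne : parts ≠ [])
    (hfree : ∀ p ∈ parts, '\n' ∉ p) :
    splitPieces [] (PySem.Chars.join ['\n'] parts) = parts := by
  induction parts with
  | nil => exact absurd rfl hne
  | cons p ps ih =>
    cases ps with
    | nil =>
      rw [PySem.Chars.join_singleton]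
      have hstep := splitPieces_append p [] [] (hfree p (by simp))
      simp only [List.append_nil, List.nil_append] at hstep
      rw [hstep]
      rfl
    | cons q qs =>
      rw [PySem.Chars.join_cons_cons]
      have hp : '\n' ∉ p := hfree p (by simp)
      rw [List.append_assoc, splitPieces_append p [] _ hp]
      simp only [List.nil_append, List.singleton_append]
      rw [show splitPieces p ('\n' :: PySem.Chars.join ['\n'] (q :: qs))
            = p :: splitPieces [] (PySem.Chars.join ['\n'] (q :: qs)) from by simp [splitPieces],
          ih (by simp) (fun r hr => hfree r (List.mem_cons_of_mem _ hr))]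

-- ---- join of joins ----

theorem join_append (xs ys : List (List Char)) (hx : xs ≠ []) (hy : ys ≠ []) :
    PySem.Chars.join ['\n'] (xs ++ ys)
      = PySem.Chars.join ['\n'] xs ++ '\n' :: PySem.Chars.join ['\n'] ys := by
  induction xs with
  | nil => exact absurd rfl hx
  | cons x xs ih =>
    cases xs with
    | nil =>
      rcases ys with _ | ⟨y, ys⟩
      · exact absurd rfl hy
      · rw [List.singleton_append, PySem.Chars.join_cons_cons, PySem.Chars.join_singleton]
        simp
    | cons x2 xs2 =>
      rw [show (x :: x2 :: xs2) ++ ys = x :: x2 :: (xs2 ++ ys) from rfl,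
          PySem.Chars.join_cons_cons,
          show x2 :: (xs2 ++ ys) = (x2 :: xs2) ++ ys from rfl,
          ih (by simp), PySem.Chars.join_cons_cons]
      simp

theorem join_join (pss : List (List (List Char))) (h : ∀ ps ∈ pss, ps ≠ []) :
    PySem.Chars.join ['\n'] (pss.map (PySem.Chars.join ['\n']))
      = PySem.Chars.join ['\n'] pss.flatten := by
  induction pss with
  | nil => simp
  | cons ps pss ih =>
    cases pss with
    | nil => simp [PySem.Chars.join_singleton]
    | cons ps2 pss2 =>
      rw [List.map_cons, List.map_cons, PySem.Chars.join_cons_cons, ← List.map_cons,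
          ih (fun q hq => h q (List.mem_cons_of_mem _ hq))]
      have h2 : (ps2 :: pss2).flatten ≠ [] := by
        simp only [List.flatten_cons]
        intro hcon
        rw [List.append_eq_nil_iff] at hcon
        exact h ps2 (by simp) hcon.1
      rw [show (ps :: ps2 :: pss2).flatten = ps ++ (ps2 :: pss2).flatten from rfl,
          join_append ps _ (h ps (by simp)) h2]
      simp

-- ---- the two line lists agree ----

theorem mem_rstrip (l : List Char) (x : Char) (h : x ∈ PySem.Chars.rstrip l) : x ∈ l := by
  simp only [PySem.Chars.rstrip, List.mem_reverse] at h
  exact List.mem_reverse.mp ((List.dropWhile_sublist _).mem h)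

theorem wrap_free (n : Nat) : ∀ (l : List Char), l.length ≤ n → '\n' ∉ l →
    ∀ (cesure : Nat) (p : List Char), p ∈ wrapB l cesure → '\n' ∉ p := by
  induction n with
  | zero =>
    intro l hl hfree cesure p hp
    have : l = [] := by cases l <;> simp_all
    subst this
    rw [wrapB] at hp
    have h0 : (PySem.Chars.rstrip ([] : List Char)).length ≤ cesure := by
      rw [show PySem.Chars.rstrip ([] : List Char) = [] from rfl]
      simp
    rw [if_pos h0] at hp
    simp at hp
    subst hp
    intro hc
    exact hfree (mem_rstrip _ _ hc)
  | succ n ih =>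
    intro l hl hfree cesure p hp
    have hfree' : '\n' ∉ PySem.Chars.rstrip l := fun hc => hfree (mem_rstrip _ _ hc)
    rw [wrapB] at hp
    split_ifs at hp with h1 h2
    · simp at hp; subst hp; exact hfree'
    · simp at hp; subst hp; exact hfree'
    · rcases List.mem_cons.mp hp with hp | hp
      · subst hp
        intro hc
        exact hfree' (List.mem_of_mem_take hc)
      · refine ih _ ?_ ?_ cesure p hp
        · have := rstrip_length_le l
          simp only [List.length_drop]
          omega
        · intro hc
          exact hfree' (List.mem_of_mem_drop hc)

theorem lignes_eq (t : List Char) :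
    PySem.Chars.splitOn (justifyA t 80) ['\n']
      = (PySem.Chars.splitOn (PySem.Chars.strip t) ['\n']).flatMap (fun l => wrapB l 80) := by
  rw [justifyA]
  have hlines := splitOn_pieces (PySem.Chars.strip t)
  set lines := PySem.Chars.splitOn (PySem.Chars.strip t) ['\n'] with hl
  have hfree : ∀ l ∈ lines, '\n' ∉ l := by
    rw [hlines]
    exact splitPieces_free _ [] (by simp)
  have hmap : lines.map (fun l => splitA l 80)
      = (lines.map (fun l => wrapB l 80)).map (PySem.Chars.join ['\n']) := by
    rw [List.map_map]
    exact List.map_congr_left (fun l _ => split_wrap l 80)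
  rw [hmap, join_join _ (by intro ps hps; simp at hps; rcases hps with ⟨l, _, hq⟩; rw [← hq]; exact wrapB_ne_nil l 80)]
  rw [splitOn_pieces, ← List.flatMap_def]
  apply pieces_join
  · have h1 : lines ≠ [] := by rw [hlines]; exact splitPieces_ne_nil _ _
    rcases lines with _ | ⟨l0, ls⟩
    · exact absurd rfl h1
    · simp only [List.flatMap_cons]
      intro hcon
      rw [List.append_eq_nil_iff] at hcon
      exact wrapB_ne_nil l0 80 hcon.1
  · intro p hp
    rw [List.mem_flatMap] at hp
    rcases hp with ⟨l, hlmem, hp⟩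
    exact wrap_free l.length l le_rfl (hfree l hlmem) 80 p hp

-- ---- the frame ----

theorem longueur_eq (lignes : List (List Char)) :
    lignes.foldl (fun acc l =>
        if (PySem.Chars.rstrip l).length > acc then (PySem.Chars.rstrip l).length else acc) 0
      = (lignes.map (fun l => (PySem.Chars.rstrip l).length)).foldl max 0 := by
  rw [List.foldl_map]
  congr 1
  funext a l
  simp only [Nat.max_def]
  split_ifs <;> omega

theorem join_box (xs : List (List Char)) (last : List Char) :
    PySem.Chars.join ['\n'] (xs ++ [last]) ++ ['\n']
      = xs.flatMap (fun r => r ++ ['\n']) ++ last ++ ['\n'] := by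
  induction xs with
  | nil => simp [PySem.Chars.join_singleton]
  | cons x xs ih =>
    have hx : xs ++ [last] ≠ [] := by simp
    rcases hxx : xs ++ [last] with _ | ⟨y, ys⟩
    · exact absurd hxx hx
    · rw [List.cons_append, hxx, PySem.Chars.join_cons_cons, ← hxx, List.flatMap_cons]
      simp [ih]

theorem core_eq (t m : List Char) : encadreCoreA t m = encadreCoreB t m := by
  rw [encadreCoreA, encadreCoreB]
  rw [lignes_eq t]
  set lignes := (PySem.Chars.splitOn (PySem.Chars.strip t) ['\n']).flatMap (fun l => wrapB l 80) with hlg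
  rw [longueur_eq lignes]
  set longueur := (lignes.map (fun l => (PySem.Chars.rstrip l).length)).foldl max 0 + 4 with hlong
  set bar := (List.replicate longueur m).flatten with hbar
  have hrows : lignes.foldl (fun tx l =>
        tx ++ m ++ [' '] ++ l ++
          List.replicate (longueur - (m.length + l.length) - 2) ' ' ++ m ++ ['\n']) (bar ++ ['\n'])
      = (bar ++ ['\n']) ++ lignes.flatMap (fun l =>
          (m ++ [' '] ++ l ++ List.replicate (longueur - (m.length + l.length) - 2) ' ' ++ m) ++ ['\n']) := by
    have := PySem.List.foldl_append_eq_flatMap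
      (fun l => m ++ [' '] ++ l ++ List.replicate (longueur - (m.length + l.length) - 2) ' ' ++ m ++ ['\n'])
      lignes (bar ++ ['\n'])
    rw [← this]
    congr 1
    funext tx l
    simp [List.append_assoc]
  rw [hrows]
  rw [show ([bar] ++ lignes.map (fun l =>
        m ++ [' '] ++ l ++ List.replicate (longueur - (m.length + l.length) - 2) ' ' ++ m) ++ [bar])
      = (bar :: lignes.map (fun l =>
        m ++ [' '] ++ l ++ List.replicate (longueur - (m.length + l.length) - 2) ' ' ++ m)) ++ [bar] from by simp]
  rw [join_box]
  rw [List.flatMap_cons]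
  rw [List.flatMap_map]

-- ===== VERDICT (by name: the statement is the Claim_ definition above) =====
theorem encadre_message_spec : Claim_equal_encadre_message := by
  intro texte motif _
  unfold Spec_encadre_message encadre_message encadre_message_alt
  rw [core_eq]
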